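-- pv_equiv track=rewrite | github.com/neTAC23/dhcs-final-project | parser/NamesInSongs.py | find_sex_from_song
-- ===== SOURCE A (Python) =====
-- def find_sex_from_song(lines):
--     sex = "U"
--     for line in lines:
--         data = line.split()
--         if len(data) > 6:
--             found = data[5]
--             if found == "feminine":
--                 if sex == "U" or sex == "F":
--                     sex = "F"
--                 if sex == "M":
--                     sex = "U"
--                     break
--             if found == "masculine":
--                 if sex == "U" or sex == "M":
--                     sex = "M"
--                 if sex == "F":
--                     sex = "U"
--                     break
--     return sex
-- ===== SOURCE B (Python) =====
-- def find_sex_from_song(lines):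
--     def marks(word):
--         return (len(d := line.split()) > 6 and d[5] == word for line in lines)
--     has_f = any(marks("feminine"))
--     has_m = any(marks("masculine"))
--     if has_f and not has_m:
--         return "F"
--     if has_m and not has_f:
--         return "M"
--     return "U"
-- ===== Notes on version B (the rewrite author's own statement) =====
-- stated objective: simpler
-- what changed: Replaces A's running state machine with early break by two independent existence checks (any feminine marker / any masculine marker) and one flat decision.
import Mathlib
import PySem

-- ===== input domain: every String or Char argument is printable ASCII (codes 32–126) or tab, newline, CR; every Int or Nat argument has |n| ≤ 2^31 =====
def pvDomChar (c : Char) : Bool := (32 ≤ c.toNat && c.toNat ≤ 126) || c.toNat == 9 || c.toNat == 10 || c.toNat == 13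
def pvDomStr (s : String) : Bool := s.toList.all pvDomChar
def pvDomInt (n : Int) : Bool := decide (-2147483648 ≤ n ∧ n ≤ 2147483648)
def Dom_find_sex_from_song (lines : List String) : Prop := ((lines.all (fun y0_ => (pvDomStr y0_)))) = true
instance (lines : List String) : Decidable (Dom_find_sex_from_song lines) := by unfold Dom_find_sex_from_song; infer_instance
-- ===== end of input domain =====

-- B replaces A's running state machine with early break by two independent
-- existence checks for the two markers and one flat decision (objective: simpler).


-- ===== PORT A =====
-- literal port of A's loop: running state `sex`, the pair's Bool is Python's `break`
def pvLoopA (sex : String) (lines : List String) : String :=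
  match lines with
  | [] => sex
  | line :: rest =>
    let data := PySem.Str.split₀ line
    if data.length > 6 then
      let found := data.getD 5 ""
      let r1 :=
        if found == "feminine" then
          let s := if sex == "U" || sex == "F" then "F" else sex
          if s == "M" then ("U", true) else (s, false)
        else (sex, false)
      if r1.2 then r1.1 else
        let r2 :=
          if found == "masculine" then
            let s := if r1.1 == "U" || r1.1 == "M" then "M" else r1.1
            if s == "F" then ("U", true) else (s, false)
          else (r1.1, false)
        if r2.2 then r2.1 else pvLoopA r2.1 rest
    else pvLoopA sex rest

def find_sex_from_song (lines : List String) : String := pvLoopA "U" lines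

-- ===== PORT B =====
-- does this line carry the given marker? (len(split) > 6 and 6th token == word)
def pvMark (line word : String) : Bool :=
  let d := PySem.Str.split₀ line
  decide (d.length > 6) && (d.getD 5 "" == word)

def find_sex_from_song_alt (lines : List String) : String :=
  let hasF := lines.any (fun line => pvMark line "feminine")
  let hasM := lines.any (fun line => pvMark line "masculine")
  if hasF && !hasM then "F"
  else if hasM && !hasF then "M"
  else "U"

-- ===== PRECONDITION & SPEC =====
def Spec_find_sex_from_song (lines : List String) (out : String) : Prop := out = find_sex_from_song_alt lines
instance (lines : List String) (out : String) : Decidable (Spec_find_sex_from_song lines out) := by unfold Spec_find_sex_from_song; infer_instance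

-- ===== CLAIM (what is proved, stated in full; the proofs are below) =====
def Claim_equal_find_sex_from_song : Prop := ∀ (lines : List String), Dom_find_sex_from_song lines → Spec_find_sex_from_song lines (find_sex_from_song lines)

-- ===== LEMMAS AND PROOFS =====

-- flip an if whose condition is the negation of the other's
lemma pvIteFlip {α : Type} (P Q : Prop) [Decidable P] [Decidable Q] (h : Q ↔ ¬ P) (a b : α) :
    (if P then a else b) = (if Q then b else a) := by
  by_cases hp : P
  · rw [if_pos hp, if_neg (fun hq => (h.mp hq) hp)]
  · rw [if_neg hp, if_pos (h.mpr hp)]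

-- characterisation of A's loop at each reachable state
lemma pvLoopA_char (lines : List String) :
    (pvLoopA "U" lines =
      (let hasF := lines.any (fun line => pvMark line "feminine")
       let hasM := lines.any (fun line => pvMark line "masculine")
       if hasF && !hasM then "F" else if hasM && !hasF then "M" else "U")) ∧
    (pvLoopA "F" lines =
      (if lines.any (fun line => pvMark line "masculine") then "U" else "F")) ∧
    (pvLoopA "M" lines =
      (if lines.any (fun line => pvMark line "feminine") then "U" else "M")) := by
  induction lines with
  | nil => simp [pvLoopA]
  | cons line rest ih =>
    obtain ⟨ihU, ihF, ihM⟩ := ih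
    by_cases hl : 6 < (PySem.Str.split₀ line).length
    · by_cases hF : (PySem.Str.split₀ line)[5]?.getD "" = "feminine"
      · have hM : ¬ (PySem.Str.split₀ line)[5]?.getD "" = "masculine" := by
          rw [hF]; intro h; exact absurd h (by decide)
        refine ⟨?_, ?_, ?_⟩ <;>
          simp [pvLoopA, List.getD, hl, hF, hM, ihF, pvMark] <;>
          (try exact pvIteFlip _ _ (by push_neg; tauto) _ _)
      · by_cases hM : (PySem.Str.split₀ line)[5]?.getD "" = "masculine"
        · refine ⟨?_, ?_, ?_⟩ <;>
            simp [pvLoopA, List.getD, hl, hF, hM, ihM, pvMark] <;>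
            (try exact pvIteFlip _ _ (by push_neg; tauto) _ _)
        · refine ⟨?_, ?_, ?_⟩ <;>
            simp [pvLoopA, List.getD, hl, hF, hM, ihU, ihF, ihM, pvMark]
    · refine ⟨?_, ?_, ?_⟩ <;>
        simp [pvLoopA, List.getD, hl, ihU, ihF, ihM, pvMark]

-- ===== VERDICT (by name: the statement is the Claim_ definition above) =====
theorem find_sex_from_song_spec : Claim_equal_find_sex_from_song := by
  intro lines _
  unfold Spec_find_sex_from_song find_sex_from_song find_sex_from_song_alt
  exact (pvLoopA_char lines).1
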